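-- pv_equiv track=rewrite | github.com/AdamZhouSE/pythonHomework | Code/CodeRecords/2980/60660/298437.py | I
-- ===== SOURCE A (Python) =====
-- def I(a1,a2,s):
--     flag=0
--     ss = list(s)
--     for i in range(len(ss)-1,-1,-1):
--         if ss[i]==a1:
--             ss.insert(i,a2)
--             flag=1
--             break
--     if flag==0:
--         return 'no exist'
--     return ''.join(ss)
-- ===== SOURCE B (Python) =====
-- def I(a1, a2, s):
--     idx = -1
--     for i, ch in enumerate(s):
--         if ch == a1:
--             idx = i
--     if idx == -1:
--         return 'no exist'
--     return s[:idx] + a2 + s[idx:]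
-- ===== Notes on version B (the rewrite author's own statement) =====
-- stated objective: simpler
-- what changed: B replaces the backward scan over a mutable char list (insert + join) by a single forward pass recording the last matching index, then builds the result with string slicing.
import Mathlib
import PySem

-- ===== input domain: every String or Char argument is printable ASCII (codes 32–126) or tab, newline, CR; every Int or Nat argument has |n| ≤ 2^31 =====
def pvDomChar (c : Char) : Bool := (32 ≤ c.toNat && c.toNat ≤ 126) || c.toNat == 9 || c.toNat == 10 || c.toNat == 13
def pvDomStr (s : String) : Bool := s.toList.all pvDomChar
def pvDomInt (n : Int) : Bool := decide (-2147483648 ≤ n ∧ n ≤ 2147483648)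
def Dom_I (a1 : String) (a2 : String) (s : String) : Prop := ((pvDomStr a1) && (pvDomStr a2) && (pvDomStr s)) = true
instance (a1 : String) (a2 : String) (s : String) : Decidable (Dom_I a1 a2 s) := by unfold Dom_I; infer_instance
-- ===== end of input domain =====

-- B replaces A's backward scan over a mutable char list (insert + join) by a single
-- forward pass recording the last matching index, then builds the result by string
-- slicing (objective: simpler; not claimed faster).

-- ===== PORT A =====
-- A's loop 'for i in range(len(ss)-1,-1,-1): if ss[i]==a1: ss.insert(i,a2); break'
-- as the obvious descending structural recursion on the counter: at argument k+1 the
-- body runs for i = k.  ss is list(s) = the one-char strings of s, modelled as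
-- List (List Char); ss[i] with i in range is List.getD (exact: the index is in range).
def I_loopA (a1 a2 : List Char) (ss : List (List Char)) : Nat → Option (List (List Char))
  | 0 => none
  | k + 1 =>
    if ss.getD k [] = a1 then some (PySem.List.insert ss (k : Int) a2)
    else I_loopA a1 a2 ss k

def I (a1 : String) (a2 : String) (s : String) : String :=
  let ss : List (List Char) := s.toList.map (fun c => [c])
  match I_loopA a1.toList a2.toList ss ss.length with
  | none => "no exist"                                   -- flag == 0
  | some l => String.ofList (PySem.Chars.join [] l)      -- ''.join(ss)

-- ===== PORT B =====
-- Source B: one forward pass with enumerate keeping the index of the last ch == a1,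
-- then s[:idx] + a2 + s[idx:].
def I_alt (a1 : String) (a2 : String) (s : String) : String :=
  let idx : Int :=
    (PySem.List.enumerate s.toList 0).foldl
      (fun acc p => if [p.2] = a1.toList then p.1 else acc) (-1)
  if idx = -1 then "no exist"
  else String.ofList (PySem.List.slice s.toList none (some idx) ++ a2.toList
                      ++ PySem.List.slice s.toList (some idx) none)

-- ===== PRECONDITION & SPEC =====
def Spec_I (a1 : String) (a2 : String) (s : String) (out : String) : Prop := out = I_alt a1 a2 s
instance (a1 : String) (a2 : String) (s : String) (out : String) : Decidable (Spec_I a1 a2 s out) := by unfold Spec_I; infer_instance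

-- ===== CLAIM (what is proved, stated in full; the proofs are below) =====
def Claim_equal_I : Prop := ∀ (a1 : String) (a2 : String) (s : String), Dom_I a1 a2 s → Spec_I a1 a2 s (I a1 a2 s)

-- ===== LEMMAS AND PROOFS =====

-- Index (if any) of the last occurrence of a1 among the first k one-char pieces of cs.
def lastBelow (a1 : List Char) (cs : List Char) : Nat → Option Nat
  | 0 => none
  | k + 1 => if [cs.getD k ' '] = a1 then some k else lastBelow a1 cs k

theorem lastBelow_lt (a1 cs : List Char) (k i : Nat) (h : lastBelow a1 cs k = some i) : i < k := by
  induction k with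
  | zero => simp [lastBelow] at h
  | succ k ih =>
    simp only [lastBelow] at h
    split at h
    · injection h with h; omega
    · exact Nat.lt_succ_of_lt (ih h)

theorem lastBelow_prefix (a1 : List Char) (xs : List Char) (x : Char) (k : Nat)
    (hk : k ≤ xs.length) : lastBelow a1 (xs ++ [x]) k = lastBelow a1 xs k := by
  induction k with
  | zero => rfl
  | succ k ih =>
    have hlt : k < xs.length := hk
    simp only [lastBelow, ih (Nat.le_of_lt hlt)]
    rw [List.getD_eq_getElem _ _ (by simpa using Nat.lt_succ_of_lt hlt),
        List.getD_eq_getElem _ _ hlt, List.getElem_append_left hlt]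

-- A's loop computes lastBelow and inserts there.
theorem loopA_eq (a1 a2 cs : List Char) (k : Nat) (hk : k ≤ cs.length) :
    I_loopA a1 a2 (cs.map (fun c => [c])) k =
      (match lastBelow a1 cs k with
       | none => none
       | some i => some (PySem.List.insert (cs.map (fun c => [c])) (i : Int) a2)) := by
  induction k with
  | zero => rfl
  | succ k ih =>
    have hlt : k < cs.length := hk
    simp only [I_loopA, lastBelow,
      List.getD_eq_getElem (cs.map (fun c => [c])) [] (by simpa using hlt),
      List.getD_eq_getElem cs ' ' hlt, List.getElem_map]
    split
    · rfl
    · exact ih (Nat.le_of_lt hlt)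

-- B's fold computes lastBelow over the whole string (-1 = none).
theorem fold_eq (a1 cs : List Char) :
    (PySem.List.enumerate cs 0).foldl
        (fun acc p => if [p.2] = a1 then p.1 else acc) (-1) =
      (match lastBelow a1 cs cs.length with
       | none => (-1 : Int)
       | some i => (i : Int)) := by
  induction cs using List.reverseRecOn with
  | nil => rfl
  | append_singleton xs x ih =>
    rw [PySem.List.enumerate_append, List.foldl_append, ih]
    have hget : (xs ++ [x]).getD xs.length ' ' = x := by
      rw [List.getD_eq_getElem _ _ (by simp), List.getElem_append_right (Nat.le_refl _)]
      simp
    simp only [List.length_append, List.length_singleton, lastBelow, hget,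
      lastBelow_prefix a1 xs x xs.length (Nat.le_refl _),
      PySem.List.enumerate, List.foldl_cons, List.foldl_nil]
    split
    · simp
    · rfl

-- join with empty separator concatenates.
theorem join_nil_append (l1 l2 : List (List Char)) :
    PySem.Chars.join [] (l1 ++ l2) = PySem.Chars.join [] l1 ++ PySem.Chars.join [] l2 := by
  induction l1 with
  | nil => simp [PySem.Chars.join_nil]
  | cons x t ih =>
    cases t with
    | nil =>
      cases l2 with
      | nil => simp [PySem.Chars.join_nil, PySem.Chars.join_singleton]
      | cons y u => simp [PySem.Chars.join_singleton, PySem.Chars.join_cons_cons]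
    | cons y u =>
      simp only [List.cons_append, PySem.Chars.join_cons_cons] at *
      simp [ih, List.append_assoc]

-- ===== VERDICT (by name: the statement is the Claim_ definition above) =====
theorem I_spec : Claim_equal_I := by
  intro a1 a2 s _
  unfold Spec_I I I_alt
  simp only [List.length_map]
  rw [loopA_eq a1.toList a2.toList s.toList s.toList.length (Nat.le_refl _),
      fold_eq a1.toList s.toList]
  cases h : lastBelow a1.toList s.toList s.toList.length with
  | none => rfl
  | some i =>
    have hi : i < s.toList.length := lastBelow_lt _ _ _ _ h
    show String.ofList (PySem.Chars.join []
          (PySem.List.insert (s.toList.map (fun c => [c])) (i : Int) a2.toList))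
        = if (i : Int) = -1 then "no exist"
          else String.ofList (PySem.List.slice s.toList none (some (i : Int)) ++ a2.toList
                              ++ PySem.List.slice s.toList (some (i : Int)) none)
    rw [if_neg (show ¬((i : Int) = -1) by omega)]
    rw [PySem.List.slice_to_natCast, PySem.List.slice_from_natCast,
        PySem.List.insert_natCast _ i _ (by simpa using Nat.le_of_lt hi)]
    rw [show ((s.toList.map (fun c => [c])).take i ++ a2.toList :: (s.toList.map (fun c => [c])).drop i)
          = (s.toList.map (fun c => [c])).take i ++ ([a2.toList] ++ (s.toList.map (fun c => [c])).drop i) by simp]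
    rw [join_nil_append, join_nil_append, PySem.Chars.join_singleton,
        ← List.map_take, ← List.map_drop,
        PySem.Chars.join_nil_singletons, PySem.Chars.join_nil_singletons]
    simp [List.append_assoc]
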